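-- pv_equiv track=rewrite | github.com/pypi-data/pypi-mirror-232 | packages/weathon/weathon-0.0.0.21-py3-none-any.whl/weathon/utils_/ner_utils.py | bmes_tag_to_spans
-- ===== SOURCE A (Python) =====
-- def bmes_tag_to_spans(tags, ignore_labels=None):
--     """
--     给定一个tags的lis，比如['S-song', 'B-singer', 'M-singer', 'E-singer', 'S-moive', 'S-actor']。
--     返回[('song', (0, 1)), ('singer', (1, 4)), ('moive', (4, 5)), ('actor', (5, 6))] (左闭右开区间)
--     也可以是单纯的['S', 'B', 'M', 'E', 'B', 'M', 'M',...]序列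
--     :param tags: List[str],
--     :param ignore_labels: List[str], 在该list中的label将被忽略
--     :return: List[Tuple[str, List[int, int]]]. [(label，[start, end])]
--     """
--     ignore_labels = set(ignore_labels) if ignore_labels else set()
--
--     spans = []
--     prev_bmes_tag = None
--     for idx, tag in enumerate(tags):
--         tag = tag.lower()
--         bmes_tag, label = tag[:1], tag[2:]
--         if bmes_tag in ('b', 's'):
--             spans.append((label, [idx, idx]))
--         elif bmes_tag in ('m', 'e') and prev_bmes_tag in ('b', 'm') and label == spans[-1][0]:
--             spans[-1][1][1] = idx
--         else:
--             spans.append((label, [idx, idx]))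
--         prev_bmes_tag = bmes_tag
--     return [(span[0], span[1][0], span[1][1])
--             for span in spans
--             if span[0] not in ignore_labels
--             ]
-- ===== SOURCE B (Python) =====
-- def bmes_tag_to_spans(tags, ignore_labels=None):
--     """Two-pass boundary version: record span starts only, then derive each
--     span's inclusive end from the next span's start (or the end of the tags)."""
--     ignore = frozenset(ignore_labels) if ignore_labels else frozenset()
--
--     # pass 1: boundary records (label, start_index)
--     bounds = []
--     prev_bmes = None
--     for idx, tag in enumerate(tags):
--         t = tag.lower()
--         bmes, label = t[:1], t[2:]
--         extends = (bmes in ('m', 'e') and prev_bmes in ('b', 'm')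
--                    and bounds and label == bounds[-1][0])
--         if not extends:
--             bounds.append((label, idx))
--         prev_bmes = bmes
--
--     # pass 2: ends from the gaps between consecutive boundaries
--     out = []
--     for i, (label, start) in enumerate(bounds):
--         end = (bounds[i + 1][1] if i + 1 < len(bounds) else len(tags)) - 1
--         if label not in ignore:
--             out.append((label, start, end))
--     return out
-- ===== Notes on version B (the rewrite author's own statement) =====
-- stated objective: alternative
-- what changed: B replaces A's append-then-mutate-last span list with a two-pass scheme: one scan emitting only span-start boundaries, then a second pass deriving each inclusive end from the next boundary's start (or len(tags)-1).
import Mathlib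
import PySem

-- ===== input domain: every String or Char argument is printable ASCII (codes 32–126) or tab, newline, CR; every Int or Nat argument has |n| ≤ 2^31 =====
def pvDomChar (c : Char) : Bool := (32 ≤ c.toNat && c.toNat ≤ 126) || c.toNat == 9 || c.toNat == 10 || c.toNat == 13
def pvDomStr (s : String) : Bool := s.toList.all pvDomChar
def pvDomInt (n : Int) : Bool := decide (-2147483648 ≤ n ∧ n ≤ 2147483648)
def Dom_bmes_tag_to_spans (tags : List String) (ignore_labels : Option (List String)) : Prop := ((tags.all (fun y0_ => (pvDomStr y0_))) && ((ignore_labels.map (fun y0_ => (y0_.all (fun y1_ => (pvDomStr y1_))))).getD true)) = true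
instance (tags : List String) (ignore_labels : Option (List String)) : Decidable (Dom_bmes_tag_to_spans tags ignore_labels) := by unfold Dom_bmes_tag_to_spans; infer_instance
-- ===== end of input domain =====

-- B replaces A's append-then-mutate-last span list by a boundary list plus a second
-- pass deriving each inclusive end from the next boundary's start (alternative decomposition, same cost).


-- ===== PORT A =====
-- ignore_labels = set(ignore_labels) if ignore_labels else set()   (shared truthiness helper)
def pvIgnoreSet (ignore_labels : Option (List String)) : PySem.Set String :=
  match ignore_labels with
  | some l => if l.isEmpty then PySem.Set.empty else PySem.Set.ofList l
  | none => PySem.Set.empty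

-- A's loop body; state = (spans in REVERSED order so that spans[-1] is the head, prev_bmes_tag).
-- spans[-1][1][1] = idx becomes rebuilding the head triple with its end replaced.
def pvAStep (st : List (String × Int × Int) × Option String) (p : Int × String) :
    List (String × Int × Int) × Option String :=
  let idx := p.1
  let tag := PySem.Str.lower p.2
  let bmes := PySem.Str.slice tag none (some 1)
  let label := PySem.Str.slice tag (some 2) none
  if bmes = "b" ∨ bmes = "s" then
    ((label, idx, idx) :: st.1, some bmes)
  else if (bmes = "m" ∨ bmes = "e") ∧ (st.2 = some "b" ∨ st.2 = some "m")
          ∧ st.1.head?.map (·.1) = some label then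
    -- spans[-1] exists whenever prev_bmes_tag ∈ ('b','m'); the [] arm is unreachable
    (match st.1 with
     | (l, s, _) :: rest => ((l, s, idx) :: rest, some bmes)
     | [] => ([], some bmes))
  else
    ((label, idx, idx) :: st.1, some bmes)

def bmes_tag_to_spans (tags : List String) (ignore_labels : Option (List String)) :
    List (String × Int × Int) :=
  let ignore := pvIgnoreSet ignore_labels
  let st := (PySem.List.enumerate tags).foldl pvAStep ([], none)
  (st.1.reverse).filter (fun sp => !(PySem.Set.contains ignore sp.1))

-- ===== PORT B =====
-- B's pass-1 loop body; state = (boundary records (label, start) in REVERSED order, prev_bmes).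
def pvBStep (st : List (String × Int) × Option String) (p : Int × String) :
    List (String × Int) × Option String :=
  let idx := p.1
  let t := PySem.Str.lower p.2
  let bmes := PySem.Str.slice t none (some 1)
  let label := PySem.Str.slice t (some 2) none
  if (bmes = "m" ∨ bmes = "e") ∧ (st.2 = some "b" ∨ st.2 = some "m")
     ∧ st.1.head?.map (·.1) = some label then
    (st.1, some bmes)
  else
    ((label, idx) :: st.1, some bmes)

-- B's pass 2: end = next boundary's start - 1, and len(tags) - 1 for the last boundary.
def pvPairEnds (n : Int) : List (String × Int) → List (String × Int × Int)
  | [] => []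
  | [(l, s)] => [(l, s, n - 1)]
  | (l, s) :: (l2, s2) :: rest => (l, s, s2 - 1) :: pvPairEnds n ((l2, s2) :: rest)

def bmes_tag_to_spans_alt (tags : List String) (ignore_labels : Option (List String)) :
    List (String × Int × Int) :=
  let ignore := pvIgnoreSet ignore_labels
  let st := (PySem.List.enumerate tags).foldl pvBStep ([], none)
  (pvPairEnds (PySem.List.len tags) st.1.reverse).filter
    (fun sp => !(PySem.Set.contains ignore sp.1))

-- ===== PRECONDITION & SPEC =====
def Spec_bmes_tag_to_spans (tags : List String) (ignore_labels : Option (List String)) (out : List (String × Int × Int)) : Prop := out = bmes_tag_to_spans_alt tags ignore_labels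
instance (tags : List String) (ignore_labels : Option (List String)) (out : List (String × Int × Int)) : Decidable (Spec_bmes_tag_to_spans tags ignore_labels out) := by unfold Spec_bmes_tag_to_spans; infer_instance

-- ===== CLAIM (what is proved, stated in full; the proofs are below) =====
def Claim_equal_bmes_tag_to_spans : Prop := ∀ (tags : List String) (ignore_labels : Option (List String)), Dom_bmes_tag_to_spans tags ignore_labels → Spec_bmes_tag_to_spans tags ignore_labels (bmes_tag_to_spans tags ignore_labels)

-- ===== LEMMAS AND PROOFS =====

-- A's span list is determined by B's boundary list and the index of the last processed tag:
-- the head span ends at `last`, each earlier one just before its successor's start.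
def pvWithEnds : List (String × Int) → Int → List (String × Int × Int)
  | [], _ => []
  | (l, s) :: rest, last => (l, s, last) :: pvWithEnds rest (s - 1)

theorem pvWithEnds_headLabel (br : List (String × Int)) (last : Int) :
    (pvWithEnds br last).head?.map (·.1) = br.head?.map (·.1) := by
  cases br with
  | nil => rfl
  | cons b rest => cases b; rfl

theorem pv_loop_inv (ts : List String) : ∀ (s : Int) (br : List (String × Int)) (prev : Option String),
    (PySem.List.enumerate ts s).foldl pvAStep (pvWithEnds br (s - 1), prev)
      = (pvWithEnds ((PySem.List.enumerate ts s).foldl pvBStep (br, prev)).1 (s - 1 + ts.length),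
         ((PySem.List.enumerate ts s).foldl pvBStep (br, prev)).2) := by
  induction ts with
  | nil => intro s br prev; simp [PySem.List.enumerate_nil]
  | cons t rest ih =>
    intro s br prev
    rw [PySem.List.enumerate_cons]
    simp only [List.foldl_cons]
    have hs : (s + 1) - 1 = s := by omega
    have hlen : (s + 1) - 1 + (rest.length : Int) = s - 1 + ((t :: rest).length : Int) := by
      simp only [List.length_cons, Nat.cast_add, Nat.cast_one]; omega
    set tag := PySem.Str.lower t with htag
    set bmes := PySem.Str.slice tag none (some 1) with hbmes
    set label := PySem.Str.slice tag (some 2) none with hlabel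
    by_cases h1 : bmes = "b" ∨ bmes = "s"
    · have hA : pvAStep (pvWithEnds br (s - 1), prev) (s, t)
          = (pvWithEnds ((label, s) :: br) ((s + 1) - 1), some bmes) := by
        simp [pvAStep, h1, pvWithEnds, ← htag, ← hbmes, ← hlabel, hs]
      have hbne : ¬ ((bmes = "m" ∨ bmes = "e") ∧ (prev = some "b" ∨ prev = some "m")
          ∧ br.head?.map (·.1) = some label) := by
        rcases h1 with h | h <;> rintro ⟨h2 | h2, _⟩ <;> simp [h] at h2
      have hB : pvBStep (br, prev) (s, t) = ((label, s) :: br, some bmes) := by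
        simp only [pvBStep, ← htag, ← hbmes, ← hlabel]
        rw [if_neg hbne]
      rw [hA, hB, ih (s + 1) ((label, s) :: br) (some bmes), hlen]
    · by_cases h2 : (bmes = "m" ∨ bmes = "e") ∧ (prev = some "b" ∨ prev = some "m")
          ∧ br.head?.map (·.1) = some label
      · -- extend branch on both sides
        obtain ⟨hme, hprev, hhead⟩ := h2
        obtain ⟨⟨l0, s0⟩, brest, hbr⟩ : ∃ b brest, br = b :: brest := by
          cases br with
          | nil => simp at hhead
          | cons b brest => exact ⟨b, brest, rfl⟩
        subst hbr
        have hl0 : l0 = label := by simpa using hhead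
        subst hl0
        have hA : pvAStep (pvWithEnds ((label, s0) :: brest) (s - 1), prev) (s, t)
            = (pvWithEnds ((label, s0) :: brest) ((s + 1) - 1), some bmes) := by
          simp only [pvAStep, ← htag, ← hbmes, ← hlabel]
          rw [if_neg h1, if_pos ⟨hme, hprev, by
            rw [pvWithEnds_headLabel]; simp⟩]
          simp [pvWithEnds, hs]
        have hB : pvBStep ((label, s0) :: brest, prev) (s, t)
            = ((label, s0) :: brest, some bmes) := by
          simp only [pvBStep, ← htag, ← hbmes, ← hlabel]
          rw [if_pos ⟨hme, hprev, by simp⟩]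
        rw [hA, hB, ih (s + 1) ((label, s0) :: brest) (some bmes), hlen]
      · -- final else: both append
        have hA : pvAStep (pvWithEnds br (s - 1), prev) (s, t)
            = (pvWithEnds ((label, s) :: br) ((s + 1) - 1), some bmes) := by
          simp only [pvAStep, ← htag, ← hbmes, ← hlabel]
          rw [if_neg h1, if_neg (by
            intro hc
            exact h2 ⟨hc.1, hc.2.1, by
              have := hc.2.2; rwa [pvWithEnds_headLabel] at this⟩)]
          simp [pvWithEnds, hs]
        have hB : pvBStep (br, prev) (s, t) = ((label, s) :: br, some bmes) := by
          simp only [pvBStep, ← htag, ← hbmes, ← hlabel]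
          rw [if_neg h2]
        rw [hA, hB, ih (s + 1) ((label, s) :: br) (some bmes), hlen]

theorem pvPairEnds_append (n l : Int) (lab : String) :
    ∀ (bs : List (String × Int)), pvPairEnds n (bs ++ [(lab, l)])
      = pvPairEnds l bs ++ [(lab, l, n - 1)]
  | [] => rfl
  | [(l1, s1)] => rfl
  | (l1, s1) :: (l2, s2) :: rest => by
    have ih := pvPairEnds_append n l lab ((l2, s2) :: rest)
    simp only [List.cons_append] at ih ⊢
    rw [pvPairEnds, ih, pvPairEnds]
    simp

theorem pv_reverse_withEnds : ∀ (br : List (String × Int)) (last : Int),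
    (pvWithEnds br last).reverse = pvPairEnds (last + 1) br.reverse
  | [], _ => rfl
  | (l, s) :: rest, last => by
    have h1 : s - 1 + 1 = s := by omega
    have h2 : last + 1 - 1 = last := by omega
    simp only [pvWithEnds, List.reverse_cons, pv_reverse_withEnds rest (s - 1),
      pvPairEnds_append, h1, h2]

-- ===== VERDICT (by name: the statement is the Claim_ definition above) =====
theorem bmes_tag_to_spans_spec : Claim_equal_bmes_tag_to_spans := by
  intro tags ignore_labels _
  unfold Spec_bmes_tag_to_spans bmes_tag_to_spans bmes_tag_to_spans_alt
  have h := pv_loop_inv tags 0 [] none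
  simp only [pvWithEnds] at h
  rw [h]
  dsimp only
  rw [pv_reverse_withEnds]
  have : 0 - 1 + (tags.length : Int) + 1 = PySem.List.len tags := by
    simp [PySem.List.len_eq]
  rw [this]
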